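-- pv_equiv track=rewrite | github.com/ajenkinski/advent-of-code | 2025/day1.py | solve_day1
-- ===== SOURCE A (Python) =====
-- def solve_day1(rotations: list[int]) -> int:
--     num_zeroes = 0
--     position = 50
--     for rotation in rotations:
--         position = (position + rotation) % 100
--         if position == 0:
--             num_zeroes += 1
--
--     return num_zeroes
-- ===== SOURCE B (Python) =====
-- def solve_day1(rotations: list[int]) -> int:
--     # Divide and conquer: rec(seg, start) returns (zero-landings in seg when the
--     # raw cumulative total starts at `start`, raw total after seg).
--     def rec(seg, start):
--         if not seg:
--             return 0, start
--         if len(seg) == 1: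
--             t = start + seg[0]
--             return (1 if t % 100 == 0 else 0), t
--         mid = len(seg) // 2
--         zl, tl = rec(seg[:mid], start)
--         zr, tr = rec(seg[mid:], tl)
--         return zl + zr, tr
--
--     return rec(rotations, 50)[0]
-- ===== Notes on version B (the rewrite author's own statement) =====
-- stated objective: alternative
-- what changed: B replaces A's single left-to-right loop with a mod-reduced position by a divide-and-conquer recursion on list halves that returns, for each segment, the pair (number of zero landings, raw unreduced end total), combining halves by threading the left half's end total into the right half.
import Mathlib
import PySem

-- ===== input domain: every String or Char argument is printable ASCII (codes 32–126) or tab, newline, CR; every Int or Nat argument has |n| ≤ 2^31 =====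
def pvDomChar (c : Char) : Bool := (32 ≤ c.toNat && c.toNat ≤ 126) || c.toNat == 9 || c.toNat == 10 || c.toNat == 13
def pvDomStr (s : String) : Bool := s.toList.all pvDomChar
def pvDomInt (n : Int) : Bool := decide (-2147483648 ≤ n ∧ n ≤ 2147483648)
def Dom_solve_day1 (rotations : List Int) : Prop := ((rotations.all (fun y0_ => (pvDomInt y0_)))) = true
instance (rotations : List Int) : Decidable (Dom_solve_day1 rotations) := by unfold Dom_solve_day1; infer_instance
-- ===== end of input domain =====

-- Header: B is a divide-and-conquer recursion on list halves returning (zero-landing count, raw end total); alternative decomposition, same values as A's single mod-reduced loop.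
-- ===== PORT A =====
def solve_day1 (rotations : List Int) : Int :=
  (rotations.foldl
    (fun (s : Int × Int) rotation =>
      let position := PySem.Int.mod (s.2 + rotation) 100
      (if position == 0 then s.1 + 1 else s.1, position))
    (0, 50)).1

-- ===== PORT B =====
-- rec(seg, start) of Source B: (zero landings in seg starting from raw total `start`, raw total after seg)
def pvRec (seg : List Int) (start : Int) : Int × Int :=
  match seg with
  | [] => (0, start)
  | [r] =>
    let t := start + r
    (if PySem.Int.mod t 100 == 0 then 1 else 0, t)
  | a :: b :: rest =>
    let s := a :: b :: rest
    let mid := s.length / 2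
    let (zl, tl) := pvRec (s.take mid) start
    let (zr, tr) := pvRec (s.drop mid) tl
    (zl + zr, tr)
termination_by seg.length
decreasing_by
  · simp [List.length_take]; omega
  · simp [List.length_drop]; omega

def solve_day1_alt (rotations : List Int) : Int :=
  (pvRec rotations 50).1

-- ===== PRECONDITION & SPEC =====
def Spec_solve_day1 (rotations : List Int) (out : Int) : Prop := out = solve_day1_alt rotations
instance (rotations : List Int) (out : Int) : Decidable (Spec_solve_day1 rotations out) := by unfold Spec_solve_day1; infer_instance

-- ===== CLAIM (what is proved, stated in full; the proofs are below) =====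
def Claim_equal_solve_day1 : Prop := ∀ (rotations : List Int), Dom_solve_day1 rotations → Spec_solve_day1 rotations (solve_day1 rotations)

-- ===== LEMMAS AND PROOFS =====

-- raw cumulative prefix totals starting from `total` (proof-only helper)
def pvPrefixes (total : Int) : List Int → List Int
  | [] => []
  | rotation :: rest => (total + rotation) :: pvPrefixes (total + rotation) rest

theorem pv_mod_add (t r : Int) :
    PySem.Int.mod (PySem.Int.mod t 100 + r) 100 = PySem.Int.mod (t + r) 100 := by
  simp [Int.emod_add_emod]

theorem pv_loop (rs : List Int) : ∀ (c t : Int),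
    (rs.foldl
      (fun (s : Int × Int) rotation =>
        let position := PySem.Int.mod (s.2 + rotation) 100
        (if position == 0 then s.1 + 1 else s.1, position))
      (c, PySem.Int.mod t 100)).1
    = c + ((pvPrefixes t rs).countP (fun p => PySem.Int.mod p 100 == 0) : Int) := by
  induction rs with
  | nil => simp [pvPrefixes]
  | cons r rest ih =>
    intro c t
    simp only [List.foldl_cons, pvPrefixes, List.countP_cons, pv_mod_add]
    rw [ih (if (PySem.Int.mod (t + r) 100 == 0) = true then c + 1 else c) (t + r)]
    split_ifs <;> push_cast <;> ring

theorem pvPrefixes_append (l1 l2 : List Int) : ∀ t : Int,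
    pvPrefixes t (l1 ++ l2) = pvPrefixes t l1 ++ pvPrefixes (t + l1.sum) l2 := by
  induction l1 with
  | nil => simp [pvPrefixes]
  | cons a r ih =>
    intro t
    simp [pvPrefixes, ih, add_assoc]

theorem pvRec_eq_aux : ∀ (n : Nat) (seg : List Int), seg.length ≤ n → ∀ (start : Int),
    pvRec seg start =
      (((pvPrefixes start seg).countP (fun p => PySem.Int.mod p 100 == 0) : Int),
        start + seg.sum) := by
  intro n
  induction n with
  | zero =>
    intro seg h start
    have hnil : seg = [] := List.eq_nil_of_length_eq_zero (Nat.le_zero.mp h)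
    subst hnil
    simp [pvRec, pvPrefixes]
  | succ n ih =>
    intro seg h start
    match seg with
    | [] => simp [pvRec, pvPrefixes]
    | [r] =>
      simp only [pvRec, pvPrefixes, List.countP_cons, List.countP_nil, List.sum_cons,
        List.sum_nil]
      split_ifs <;> simp
    | a :: b :: rest =>
      have hlen : (a :: b :: rest).length = rest.length + 2 := by simp
      have hT : ((a :: b :: rest).take ((a :: b :: rest).length / 2)).length ≤ n := by
        rw [List.length_take]; rw [hlen] at h ⊢; omega
      have hD : ((a :: b :: rest).drop ((a :: b :: rest).length / 2)).length ≤ n := by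
        rw [List.length_drop]; rw [hlen] at h ⊢; omega
      simp only [pvRec]
      rw [ih _ hT]
      rw [ih _ hD]
      have hsplit := pvPrefixes_append ((a :: b :: rest).take ((a :: b :: rest).length / 2))
        ((a :: b :: rest).drop ((a :: b :: rest).length / 2)) start
      rw [List.take_append_drop] at hsplit
      have hsum : ((a :: b :: rest).take ((a :: b :: rest).length / 2)).sum
          + ((a :: b :: rest).drop ((a :: b :: rest).length / 2)).sum
          = (a :: b :: rest).sum := by
        conv_rhs => rw [← List.take_append_drop ((a :: b :: rest).length / 2) (a :: b :: rest)]
        rw [List.sum_append]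
      rw [hsplit, List.countP_append]
      refine Prod.ext ?_ ?_
      · push_cast; ring
      · simp only []
        rw [← hsum]; ring

theorem pvRec_eq (seg : List Int) (start : Int) :
    pvRec seg start =
      (((pvPrefixes start seg).countP (fun p => PySem.Int.mod p 100 == 0) : Int),
        start + seg.sum) :=
  pvRec_eq_aux seg.length seg le_rfl start

-- ===== VERDICT (by name: the statement is the Claim_ definition above) =====
theorem solve_day1_spec : Claim_equal_solve_day1 := by
  intro rotations _
  unfold Spec_solve_day1 solve_day1 solve_day1_alt
  rw [pvRec_eq]
  have h := pv_loop rotations 0 50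
  simpa using h
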